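-- pv_equiv track=rewrite | github.com/seungjaejeon/for_pccp | day5/유전법칙.py | solution
-- ===== SOURCE A (Python) =====
-- from collections import deque
--
-- def calculate(queue):
--     beans = {'Rr' : ['RR', 'Rr', 'Rr', 'rr'], 'RR' : ['RR', 'RR', 'RR', 'RR'], 'rr' : ['rr','rr','rr','rr']}
--     start = 'Rr'
--     while queue:
--         q = queue.popleft()
--         start = beans[start][q]
--     return start
--
-- def solution(queries):
--     answer = []
--     for n, p in queries:
--         np = p - 1
--         queue = deque()
--         for i in range(n-1,0,-1):
--             parent = np // 4
--             me = np % 4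
--             queue.appendleft(me)
--             np = parent
--         answer.append(calculate(queue))
--     return answer
-- ===== SOURCE B (Python) =====
-- def solution(queries):
--     # Absorbing-state shortcut: starting from 'Rr', the genotype is decided by the
--     # most significant base-4 digit of p-1 that is 0 (-> 'RR') or 3 (-> 'rr');
--     # if all digits are 1 or 2 the answer stays 'Rr'.  One LSB-to-MSB scan per query.
--     res = []
--     for n, p in queries:
--         x = p - 1
--         decider = None
--         for _ in range(max(n - 1, 0)):
--             d = x % 4
--             if d == 0 or d == 3:
--                 decider = d
--             x //= 4
--         res.append('Rr' if decider is None else ('RR' if decider == 0 else 'rr'))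
--     return res
-- ===== Notes on version B (the rewrite author's own statement) =====
-- stated objective: alternative
-- what changed: Replaces the deque-building pass plus the genotype-table fold (calculate) by a single LSB-to-MSB digit scan that tracks only the most significant base-4 digit in {0,3}, exploiting that 'RR' and 'rr' are absorbing states; no deque, no dict, no second pass.
import Mathlib
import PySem

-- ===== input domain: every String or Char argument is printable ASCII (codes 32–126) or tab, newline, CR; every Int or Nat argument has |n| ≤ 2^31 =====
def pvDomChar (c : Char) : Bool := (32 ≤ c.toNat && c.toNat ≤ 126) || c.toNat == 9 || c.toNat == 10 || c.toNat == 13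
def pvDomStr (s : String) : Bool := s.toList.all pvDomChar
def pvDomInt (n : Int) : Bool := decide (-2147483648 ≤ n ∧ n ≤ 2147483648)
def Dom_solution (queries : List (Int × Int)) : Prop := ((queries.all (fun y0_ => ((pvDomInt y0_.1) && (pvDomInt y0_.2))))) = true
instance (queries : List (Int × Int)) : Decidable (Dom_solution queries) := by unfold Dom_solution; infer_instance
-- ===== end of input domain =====

-- B replaces A's deque build plus genotype-table fold by a single digit scan that
-- tracks the most significant base-4 digit in {0,3} (absorbing-state shortcut); same cost.

-- ===== PORT A =====
def pvBeans : PySem.Dict String (List String) :=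
  ((PySem.Dict.empty.insert "Rr" ["RR","Rr","Rr","rr"]).insert
    "RR" ["RR","RR","RR","RR"]).insert "rr" ["rr","rr","rr","rr"]

-- beans[start][q]; the defaults are never used (keys/indices always in range in A)
def calculate (queue : List Int) : String :=
  queue.foldl (fun start q => PySem.List.pyGetD (PySem.Dict.getD pvBeans start []) q "") "Rr"

def solution (queries : List (Int × Int)) : List String :=
  queries.foldl (fun answer q =>
    let n := q.1
    let p := q.2
    let st := (PySem.List.pyRange (n - 1) 0 (-1)).foldl
      (fun (s : Int × List Int) _ =>
        let parent := PySem.Int.floordiv s.1 4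
        let me := PySem.Int.mod s.1 4
        (parent, me :: s.2)) (p - 1, [])
    answer ++ [calculate st.2]) []

-- ===== PORT B =====
-- range(max(n-1,0)) has (n-1).toNat iterations
def solution_alt (queries : List (Int × Int)) : List String :=
  queries.foldl (fun res q =>
    let n := q.1
    let p := q.2
    let st := (List.range (n - 1).toNat).foldl
      (fun (s : Int × Option Int) _ =>
        let d := PySem.Int.mod s.1 4
        (PySem.Int.floordiv s.1 4, if d = 0 ∨ d = 3 then some d else s.2)) (p - 1, none)
    res ++ [match st.2 with
            | none => "Rr"
            | some d => if d = 0 then "RR" else "rr"]) []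

-- ===== PRECONDITION & SPEC =====
def Spec_solution (queries : List (Int × Int)) (out : List String) : Prop := out = solution_alt queries
instance (queries : List (Int × Int)) (out : List String) : Decidable (Spec_solution queries out) := by unfold Spec_solution; infer_instance

-- ===== CLAIM (what is proved, stated in full; the proofs are below) =====
def Claim_equal_solution : Prop := ∀ (queries : List (Int × Int)), Dom_solution queries → Spec_solution queries (solution queries)

-- ===== LEMMAS AND PROOFS =====

-- digit helpers
def pvFd (x : Int) : Int := PySem.Int.floordiv x 4
def pvMd (x : Int) : Int := PySem.Int.mod x 4

-- A's queue after k inner-loop steps starting from x (MSB first)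
def pvQ : Nat → Int → List Int
  | 0, _ => []
  | k+1, x => pvQ k (pvFd x) ++ [pvMd x]

-- B's decider after k steps starting from x
def pvDec : Nat → Int → Option Int
  | 0, _ => none
  | k+1, x =>
      match pvDec k (pvFd x) with
      | some d => some d
      | none => if pvMd x = 0 ∨ pvMd x = 3 then some (pvMd x) else none

def pvRnd : Option Int → String
  | none => "Rr"
  | some d => if d = 0 then "RR" else "rr"

lemma pvMd_cases (x : Int) : pvMd x = 0 ∨ pvMd x = 1 ∨ pvMd x = 2 ∨ pvMd x = 3 := by
  have h := PySem.Int.mod_eq_emod_of_pos (a := x) (b := 4) (by norm_num)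
  unfold pvMd
  rw [h]
  omega

lemma pvDec_cases (k : Nat) : ∀ x, pvDec k x = none ∨ pvDec k x = some 0 ∨ pvDec k x = some 3 := by
  induction k with
  | zero => intro x; left; rfl
  | succ k ih =>
    intro x
    unfold pvDec
    rcases ih (pvFd x) with h | h | h <;> rw [h]
    · rcases pvMd_cases x with hm | hm | hm | hm <;> simp [hm]
    · simp
    · simp

-- A's inner fold on any list of length k builds pvQ
lemma pvFoldA (l : List Int) : ∀ (x : Int) (q0 : List Int),
    (l.foldl (fun (s : Int × List Int) _ =>
        (PySem.Int.floordiv s.1 4, PySem.Int.mod s.1 4 :: s.2)) (x, q0)).2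
      = pvQ l.length x ++ q0 := by
  induction l with
  | nil => intro x q0; rfl
  | cons a l ih =>
    intro x q0
    simp only [List.foldl_cons, List.length_cons]
    rw [ih (PySem.Int.floordiv x 4) (PySem.Int.mod x 4 :: q0)]
    show pvQ l.length (pvFd x) ++ pvMd x :: q0 = pvQ (l.length + 1) x ++ q0
    simp [pvQ]

-- B's inner fold on any list of length k computes pvDec (or'd with the initial decider)
lemma pvFoldB {α : Type} (l : List α) : ∀ (x : Int) (d0 : Option Int),
    (l.foldl (fun (s : Int × Option Int) _ =>
        (PySem.Int.floordiv s.1 4,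
         if PySem.Int.mod s.1 4 = 0 ∨ PySem.Int.mod s.1 4 = 3 then some (PySem.Int.mod s.1 4) else s.2))
      (x, d0)).2 = (pvDec l.length x).or d0 := by
  induction l with
  | nil => intro x d0; rfl
  | cons a l ih =>
    intro x d0
    simp only [List.foldl_cons, List.length_cons]
    rw [ih]
    show (pvDec l.length (pvFd x)).or
        (if pvMd x = 0 ∨ pvMd x = 3 then some (pvMd x) else d0) = (pvDec (l.length + 1) x).or d0
    have hs : pvDec (l.length + 1) x
        = match pvDec l.length (pvFd x) with
          | some d => some d
          | none => if pvMd x = 0 ∨ pvMd x = 3 then some (pvMd x) else none := rfl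
    rw [hs]
    rcases pvDec_cases l.length (pvFd x) with h | h | h <;> rw [h] <;>
      by_cases hc : pvMd x = 0 ∨ pvMd x = 3 <;> simp [hc, Option.or]

lemma pvCalc_append (l : List Int) (q : Int) :
    calculate (l ++ [q])
      = PySem.List.pyGetD (PySem.Dict.getD pvBeans (calculate l) []) q "" := by
  simp [calculate, List.foldl_append]

-- the heart: A's table fold over the MSB-first queue equals the rendered decider
lemma pvMain (k : Nat) : ∀ x, calculate (pvQ k x) = pvRnd (pvDec k x) := by
  induction k with
  | zero => intro x; rfl
  | succ k ih =>
    intro x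
    show calculate (pvQ k (pvFd x) ++ [pvMd x]) = pvRnd (pvDec (k+1) x)
    rw [pvCalc_append, ih (pvFd x)]
    have hs : pvDec (k + 1) x
        = match pvDec k (pvFd x) with
          | some d => some d
          | none => if pvMd x = 0 ∨ pvMd x = 3 then some (pvMd x) else none := rfl
    rw [hs]
    rcases pvDec_cases k (pvFd x) with h | h | h <;> rw [h] <;>
      rcases pvMd_cases x with hm | hm | hm | hm <;> rw [hm] <;> decide

-- foldl building acc ++ [f q] is map
lemma pvFoldMap {α β : Type} (f : α → β) (l : List α) : ∀ (acc : List β),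
    l.foldl (fun a q => a ++ [f q]) acc = acc ++ l.map f := by
  induction l with
  | nil => intro acc; simp
  | cons a l ih => intro acc; simp [ih]

-- ===== VERDICT (by name: the statement is the Claim_ definition above) =====
theorem solution_spec : Claim_equal_solution := by
  intro queries _
  show solution queries = solution_alt queries
  simp only [solution, solution_alt]
  rw [pvFoldMap, pvFoldMap]
  simp only [List.nil_append]
  apply List.map_congr_left
  intro q _
  rw [pvFoldA, pvFoldB]
  have hlen : (PySem.List.pyRange (q.1 - 1) 0 (-1)).length = (q.1 - 1).toNat := by
    rw [PySem.List.pyRange_neg_one]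
    simp
  rw [hlen, List.length_range, List.append_nil, Option.or_none]
  exact pvMain (q.1 - 1).toNat (q.2 - 1)
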